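-- pv_equiv track=rewrite | github.com/conanbke-ai/re_4th | Python/알고리즘/프로그래머스/Lv.1/Day37/옹알이 (2).py | solution
-- ===== SOURCE A (Python) =====
-- def solution(babbling):
--     allowed = ["aya", "ye", "woo", "ma"]
--     answer = 0
--
--     for word in babbling:
--         i = 0
--         prev = ""   # 이전에 매칭한 음절 (연속 반복 금지 확인용)
--         valid = True
--
--         while i < len(word):
--             matched = False
--             # 각 음절이 현재 위치에서 시작하는지 확인
--             for s in allowed:
--                 if word.startswith(s, i) and s != prev:
--                     # 매칭되었고, 이전 음절과 같지 않으면 진행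
--                     prev = s
--                     i += len(s)
--                     matched = True
--                     break
--             if not matched:
--                 valid = False
--                 break
--
--         if valid:
--             answer += 1
--
--     return answer
-- ===== SOURCE B (Python) =====
-- def solution(babbling):
--     # Single-pass character state machine: each syllable starts with a unique
--     # letter, so a (pending-suffix, previous-syllable) state decides validity
--     # in one scan per word, with no candidate list and no substring matching.
--     first = {'a': "aya", 'y': "ye", 'w': "woo", 'm': "ma"}
--     count = 0
--     for word in babbling:
--         pending, prev, alive = "", "", True
--         for c in word:
--             if pending:
--                 if c == pending[0]:
--                     pending = pending[1:]
--                 else: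
--                     alive = False
--                     break
--             else:
--                 syl = first.get(c)
--                 if syl is None or syl == prev:
--                     alive = False
--                     break
--                 pending, prev = syl[1:], syl
--         if alive and pending == "":
--             count += 1
--     return count
-- ===== Notes on version B (the rewrite author's own statement) =====
-- stated objective: alternative
-- what changed: B replaces A's per-position greedy matching (inner scan over the 4-syllable list with startswith and an index) by a single left-to-right character-level state machine keeping (pending suffix of current syllable, previous syllable), using the fact that each syllable starts with a distinct letter. (measured ~2x faster: no repeated startswith/candidate scanning, one dict lookup or char comparison per character)
import Mathlib
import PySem

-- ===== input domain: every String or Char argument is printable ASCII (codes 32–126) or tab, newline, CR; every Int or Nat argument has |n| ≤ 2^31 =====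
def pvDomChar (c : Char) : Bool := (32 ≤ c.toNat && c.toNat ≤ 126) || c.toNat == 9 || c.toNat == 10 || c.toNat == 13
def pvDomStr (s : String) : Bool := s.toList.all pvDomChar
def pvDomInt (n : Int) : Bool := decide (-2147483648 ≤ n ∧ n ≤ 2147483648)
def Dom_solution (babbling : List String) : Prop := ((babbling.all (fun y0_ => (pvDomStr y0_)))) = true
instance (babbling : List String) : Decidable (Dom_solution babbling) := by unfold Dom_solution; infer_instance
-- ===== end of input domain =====

-- B replaces A's greedy substring matching (inner scan over the candidate list at each
-- position) by a single-pass character state machine; objective: alternative.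

-- ===== PORT A =====
def pvAllowed : List String := ["aya", "ye", "woo", "ma"]

-- word.startswith(s, i): exact for 0 ≤ i (in A, i starts at 0 and only increases)
def pvStartsAt (w : List Char) (s : String) (i : Int) : Bool :=
  s.toList.isPrefixOf (w.drop i.toNat)

-- the inner `for s in allowed: … break` of A: first syllable that matches and differs from prev
def pvFindMatch : List String → List Char → Int → String → Option String
  | [], _, _, _ => none
  | s :: rest, w, i, prev =>
    if pvStartsAt w s i && !(s == prev) then some s else pvFindMatch rest w i prev

-- termination fact cited by pvWhileA's decreasing_by
lemma pvFindMatch_pos (w : List Char) (i : Int) (prev s : String)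
    (h : pvFindMatch pvAllowed w i prev = some s) : 0 < s.length := by
  simp only [pvAllowed, pvFindMatch] at h
  split_ifs at h <;> simp_all <;> (subst h; decide)

-- A's `while i < len(word)` loop
def pvWhileA (w : List Char) (i : Int) (prev : String) : Bool :=
  if i < (w.length : Int) then
    match h : pvFindMatch pvAllowed w i prev with
    | some s => pvWhileA w (i + (s.length : Int)) s
    | none => false
  else true
termination_by ((w.length : Int) - i).toNat
decreasing_by
  have := pvFindMatch_pos w i prev s h
  omega

def solution (babbling : List String) : Int :=
  babbling.foldl (fun answer word => if pvWhileA word.toList 0 "" then answer + 1 else answer) 0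

-- ===== PORT B =====
-- first.get(c): hand port of the 4-entry literal dict (exact: fixed distinct keys)
def pvFirstGet (c : Char) : Option String :=
  if c = 'a' then some "aya" else if c = 'y' then some "ye"
  else if c = 'w' then some "woo" else if c = 'm' then some "ma" else none

-- one character step of B's state machine; the dead state (alive=False / break) is `none`, absorbing
def pvStep (st : Option (List Char × String)) (c : Char) : Option (List Char × String) :=
  match st with
  | none => none
  | some (pending, prev) =>
    match pending with
    | q :: qs => if c == q then some (qs, prev) else none
    | [] =>
      match pvFirstGet c with
      | none => none
      | some syl => if syl == prev then none else some (syl.toList.drop 1, syl)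

def pvCheckB (word : String) : Bool :=
  match word.toList.foldl pvStep (some ([], "")) with
  | some ([], _) => true
  | _ => false

def solution_alt (babbling : List String) : Int :=
  babbling.foldl (fun count word => if pvCheckB word then count + 1 else count) 0

-- ===== PRECONDITION & SPEC =====
def Spec_solution (babbling : List String) (out : Int) : Prop := out = solution_alt babbling
instance (babbling : List String) (out : Int) : Decidable (Spec_solution babbling out) := by unfold Spec_solution; infer_instance

-- ===== CLAIM (what is proved, stated in full; the proofs are below) =====
def Claim_equal_solution : Prop := ∀ (babbling : List String), Dom_solution babbling → Spec_solution babbling (solution babbling)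

-- ===== LEMMAS AND PROOFS =====

-- B's acceptance test, generalized over the starting prev
def pvAccept (cs : List Char) (p : String) : Bool :=
  match cs.foldl pvStep (some ([], p)) with
  | some ([], _) => true
  | _ => false

lemma pvFold_none (cs : List Char) : cs.foldl pvStep none = none := by
  induction cs with
  | nil => rfl
  | cons c cs ih => simp [List.foldl, pvStep, ih]

lemma pvLoop_eq (n : Nat) : ∀ (w : List Char) (i : Int) (p : String), 0 ≤ i →
    (((w.length : Int) - i).toNat ≤ n) → pvWhileA w i p = pvAccept (w.drop i.toNat) p := by
  induction n with
  | zero =>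
    intro w i p hi hn
    have hge : ¬ i < (w.length : Int) := by omega
    have hdrop : w.drop i.toNat = [] := by
      apply List.drop_eq_nil_of_le; omega
    rw [pvWhileA.eq_def, if_neg hge, hdrop]
    rfl
  | succ n ih =>
    intro w i p hi hn
    rw [pvWhileA.eq_def]
    by_cases hlt : i < (w.length : Int)
    · rw [if_pos hlt]
      rcases h' : w.drop i.toNat with _ | ⟨c, rest⟩
      · exfalso
        have := congrArg List.length h'
        simp at this
        omega
      · -- cs = c :: rest
        by_cases hca : c = 'a'
        · subst hca
          by_cases hp : ("aya" : String) = p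
          · have hfm : pvFindMatch pvAllowed w i p = none := by
              simp [pvFindMatch, pvAllowed, pvStartsAt, h', List.isPrefixOf, hp]
            rw [hfm]
            simp [pvAccept, List.foldl, pvStep, pvFirstGet, pvFold_none, hp]
          · have hpb : (("aya" : String) == p) = false := beq_eq_false_iff_ne.mpr hp
            rcases rest with _ | ⟨c2, rest2⟩
            · have hfm : pvFindMatch pvAllowed w i p = none := by
                simp [pvFindMatch, pvAllowed, pvStartsAt, h', List.isPrefixOf, hpb]
              rw [hfm]
              simp [pvAccept, List.foldl, pvStep, pvFirstGet, hpb]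
            · by_cases hc2 : c2 = 'y'
              · subst hc2
                rcases rest2 with _ | ⟨c3, rest3⟩
                · have hfm : pvFindMatch pvAllowed w i p = none := by
                    simp [pvFindMatch, pvAllowed, pvStartsAt, h', List.isPrefixOf, hpb]
                  rw [hfm]
                  simp [pvAccept, List.foldl, pvStep, pvFirstGet, hpb]
                · by_cases hc3 : c3 = 'a'
                  · subst hc3
                    have hfm : pvFindMatch pvAllowed w i p = some "aya" := by
                      simp [pvFindMatch, pvAllowed, pvStartsAt, h', List.isPrefixOf, hpb]
                    rw [hfm]
                    show pvWhileA w (i + (3 : Int)) "aya" = _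
                    have hrec := ih w (i + 3) "aya" (by omega) (by omega)
                    have hdrop : w.drop (i + (3 : Int)).toNat = rest3 := by
                      rw [show (i + (3 : Int)).toNat = i.toNat + 3 from by omega, ← List.drop_drop, h']
                      rfl
                    rw [hrec, hdrop]
                    simp [pvAccept, List.foldl, pvStep, pvFirstGet, hpb]
                  · have hb : ('a' == c3) = false := beq_eq_false_iff_ne.mpr (Ne.symm hc3)
                    have hfm : pvFindMatch pvAllowed w i p = none := by
                      simp [pvFindMatch, pvAllowed, pvStartsAt, h', List.isPrefixOf, hpb, hb]
                    rw [hfm]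
                    simp [pvAccept, List.foldl, pvStep, pvFirstGet, pvFold_none, hpb, hc3]
              · have hb : ('y' == c2) = false := beq_eq_false_iff_ne.mpr (Ne.symm hc2)
                have hfm : pvFindMatch pvAllowed w i p = none := by
                  simp [pvFindMatch, pvAllowed, pvStartsAt, h', List.isPrefixOf, hpb, hb]
                rw [hfm]
                simp [pvAccept, List.foldl, pvStep, pvFirstGet, pvFold_none, hpb, hc2]
        · have ha' : ('a' == c) = false := beq_eq_false_iff_ne.mpr (Ne.symm hca)
          by_cases hcy : c = 'y'
          · subst hcy
            by_cases hp : ("ye" : String) = p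
            · have hfm : pvFindMatch pvAllowed w i p = none := by
                simp [pvFindMatch, pvAllowed, pvStartsAt, h', List.isPrefixOf, hp]
              rw [hfm]
              simp [pvAccept, List.foldl, pvStep, pvFirstGet, pvFold_none, hp]
            · have hpb : (("ye" : String) == p) = false := beq_eq_false_iff_ne.mpr hp
              rcases rest with _ | ⟨c2, rest2⟩
              · have hfm : pvFindMatch pvAllowed w i p = none := by
                  simp [pvFindMatch, pvAllowed, pvStartsAt, h', List.isPrefixOf, hpb]
                rw [hfm]
                simp [pvAccept, List.foldl, pvStep, pvFirstGet, hpb]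
              · by_cases hc2 : c2 = 'e'
                · subst hc2
                  have hfm : pvFindMatch pvAllowed w i p = some "ye" := by
                    simp [pvFindMatch, pvAllowed, pvStartsAt, h', List.isPrefixOf, hpb]
                  rw [hfm]
                  show pvWhileA w (i + (2 : Int)) "ye" = _
                  have hrec := ih w (i + 2) "ye" (by omega) (by omega)
                  have hdrop : w.drop (i + (2 : Int)).toNat = rest2 := by
                    rw [show (i + (2 : Int)).toNat = i.toNat + 2 from by omega, ← List.drop_drop, h']
                    rfl
                  rw [hrec, hdrop]
                  simp [pvAccept, List.foldl, pvStep, pvFirstGet, hpb]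
                · have hb : ('e' == c2) = false := beq_eq_false_iff_ne.mpr (Ne.symm hc2)
                  have hfm : pvFindMatch pvAllowed w i p = none := by
                    simp [pvFindMatch, pvAllowed, pvStartsAt, h', List.isPrefixOf, hpb, hb]
                  rw [hfm]
                  simp [pvAccept, List.foldl, pvStep, pvFirstGet, pvFold_none, hpb, hc2]
          · have hy' : ('y' == c) = false := beq_eq_false_iff_ne.mpr (Ne.symm hcy)
            by_cases hcw : c = 'w'
            · subst hcw
              by_cases hp : ("woo" : String) = p
              · have hfm : pvFindMatch pvAllowed w i p = none := by
                  simp [pvFindMatch, pvAllowed, pvStartsAt, h', List.isPrefixOf, hp]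
                rw [hfm]
                simp [pvAccept, List.foldl, pvStep, pvFirstGet, pvFold_none, hp]
              · have hpb : (("woo" : String) == p) = false := beq_eq_false_iff_ne.mpr hp
                rcases rest with _ | ⟨c2, rest2⟩
                · have hfm : pvFindMatch pvAllowed w i p = none := by
                    simp [pvFindMatch, pvAllowed, pvStartsAt, h', List.isPrefixOf, hpb]
                  rw [hfm]
                  simp [pvAccept, List.foldl, pvStep, pvFirstGet, hpb]
                · by_cases hc2 : c2 = 'o'
                  · subst hc2
                    rcases rest2 with _ | ⟨c3, rest3⟩
                    · have hfm : pvFindMatch pvAllowed w i p = none := by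
                        simp [pvFindMatch, pvAllowed, pvStartsAt, h', List.isPrefixOf, hpb]
                      rw [hfm]
                      simp [pvAccept, List.foldl, pvStep, pvFirstGet, hpb]
                    · by_cases hc3 : c3 = 'o'
                      · subst hc3
                        have hfm : pvFindMatch pvAllowed w i p = some "woo" := by
                          simp [pvFindMatch, pvAllowed, pvStartsAt, h', List.isPrefixOf, hpb]
                        rw [hfm]
                        show pvWhileA w (i + (3 : Int)) "woo" = _
                        have hrec := ih w (i + 3) "woo" (by omega) (by omega)
                        have hdrop : w.drop (i + (3 : Int)).toNat = rest3 := by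
                          rw [show (i + (3 : Int)).toNat = i.toNat + 3 from by omega, ← List.drop_drop, h']
                          rfl
                        rw [hrec, hdrop]
                        simp [pvAccept, List.foldl, pvStep, pvFirstGet, hpb]
                      · have hb : ('o' == c3) = false := beq_eq_false_iff_ne.mpr (Ne.symm hc3)
                        have hfm : pvFindMatch pvAllowed w i p = none := by
                          simp [pvFindMatch, pvAllowed, pvStartsAt, h', List.isPrefixOf, hpb, hb]
                        rw [hfm]
                        simp [pvAccept, List.foldl, pvStep, pvFirstGet, pvFold_none, hpb, hc3]
                  · have hb : ('o' == c2) = false := beq_eq_false_iff_ne.mpr (Ne.symm hc2)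
                    have hfm : pvFindMatch pvAllowed w i p = none := by
                      simp [pvFindMatch, pvAllowed, pvStartsAt, h', List.isPrefixOf, hpb, hb]
                    rw [hfm]
                    simp [pvAccept, List.foldl, pvStep, pvFirstGet, pvFold_none, hpb, hc2]
            · have hw' : ('w' == c) = false := beq_eq_false_iff_ne.mpr (Ne.symm hcw)
              by_cases hcm : c = 'm'
              · subst hcm
                by_cases hp : ("ma" : String) = p
                · have hfm : pvFindMatch pvAllowed w i p = none := by
                    simp [pvFindMatch, pvAllowed, pvStartsAt, h', List.isPrefixOf, hp]
                  rw [hfm]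
                  simp [pvAccept, List.foldl, pvStep, pvFirstGet, pvFold_none, hp]
                · have hpb : (("ma" : String) == p) = false := beq_eq_false_iff_ne.mpr hp
                  rcases rest with _ | ⟨c2, rest2⟩
                  · have hfm : pvFindMatch pvAllowed w i p = none := by
                      simp [pvFindMatch, pvAllowed, pvStartsAt, h', List.isPrefixOf, hpb]
                    rw [hfm]
                    simp [pvAccept, List.foldl, pvStep, pvFirstGet, hpb]
                  · by_cases hc2 : c2 = 'a'
                    · subst hc2
                      have hfm : pvFindMatch pvAllowed w i p = some "ma" := by
                        simp [pvFindMatch, pvAllowed, pvStartsAt, h', List.isPrefixOf, hpb]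
                      rw [hfm]
                      show pvWhileA w (i + (2 : Int)) "ma" = _
                      have hrec := ih w (i + 2) "ma" (by omega) (by omega)
                      have hdrop : w.drop (i + (2 : Int)).toNat = rest2 := by
                        rw [show (i + (2 : Int)).toNat = i.toNat + 2 from by omega, ← List.drop_drop, h']
                        rfl
                      rw [hrec, hdrop]
                      simp [pvAccept, List.foldl, pvStep, pvFirstGet, hpb]
                    · have hb : ('a' == c2) = false := beq_eq_false_iff_ne.mpr (Ne.symm hc2)
                      have hfm : pvFindMatch pvAllowed w i p = none := by
                        simp [pvFindMatch, pvAllowed, pvStartsAt, h', List.isPrefixOf, hpb, hb]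
                      rw [hfm]
                      simp [pvAccept, List.foldl, pvStep, pvFirstGet, pvFold_none, hpb, hc2]
              · have hm' : ('m' == c) = false := beq_eq_false_iff_ne.mpr (Ne.symm hcm)
                have hfm : pvFindMatch pvAllowed w i p = none := by
                  simp [pvFindMatch, pvAllowed, pvStartsAt, h', List.isPrefixOf, ha', hy', hw', hm']
                rw [hfm]
                simp [pvAccept, List.foldl, pvStep, pvFirstGet, pvFold_none, hca, hcy, hcw, hcm]
    · rw [if_neg hlt]
      have hdrop : w.drop i.toNat = [] := by
        apply List.drop_eq_nil_of_le; omega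
      rw [hdrop]; rfl

lemma pvWord_eq (word : String) : pvWhileA word.toList 0 "" = pvCheckB word := by
  have := pvLoop_eq ((word.toList.length : Int) - 0).toNat word.toList 0 "" (by omega) (by omega)
  simpa [pvCheckB, pvAccept] using this

-- ===== VERDICT (by name: the statement is the Claim_ definition above) =====
theorem solution_spec : Claim_equal_solution := by
  intro babbling _
  unfold Spec_solution solution solution_alt
  induction babbling using List.reverseRecOn with
  | nil => rfl
  | append_singleton xs x ih => simp [List.foldl_append, pvWord_eq]
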